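-- pv_equiv track=rewrite | github.com/SECQUOIA/dsda-gdp | gdp/column/dsda_gdp_column.py | list_generator
-- ===== SOURCE A (Python) =====
-- def list_generator(NT):
--     X1, X2, aux, aux2, x = [], [], [], 1, {}
--
--     for i in range(1, NT+1):
--         X1.append(i)
--         aux.append(i)
--         X2.append(aux2)
--
--     for i in range(NT-1):
--         aux.pop(0)
--         aux2 += 1
--         for j in aux:
--             X1.append(j)
--             X2.append(aux2)
--     return X1, X2
-- ===== SOURCE B (Python) =====
-- def list_generator(NT):
--     X1, X2 = [], []
--     for k in range(1, NT + 1):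
--         for j in range(k, NT + 1):
--             X1.append(j)
--             X2.append(k)
--     return X1, X2
-- ===== Notes on version B (the rewrite author's own statement) =====
-- stated objective: simpler
-- what changed: Replaced A's two-phase construction (seed pass plus a maintained auxiliary list shrunk by pop(0) and a separate counter) by one direct nested loop over k=1..NT, j=k..NT that emits each pair immediately.
import Mathlib
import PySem

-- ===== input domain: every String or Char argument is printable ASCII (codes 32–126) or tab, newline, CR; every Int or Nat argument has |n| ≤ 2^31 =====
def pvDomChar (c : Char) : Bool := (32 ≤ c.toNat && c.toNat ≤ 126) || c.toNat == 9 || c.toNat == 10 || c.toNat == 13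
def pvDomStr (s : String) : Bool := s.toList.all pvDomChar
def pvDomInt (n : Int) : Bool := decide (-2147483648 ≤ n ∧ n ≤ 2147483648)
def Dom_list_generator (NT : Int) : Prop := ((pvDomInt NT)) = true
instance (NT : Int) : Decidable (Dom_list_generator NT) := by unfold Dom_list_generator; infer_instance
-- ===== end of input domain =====

-- B replaces A's two-phase construction (seed pass + auxiliary list shrunk by pop(0) + counter)
-- with one direct nested loop over k=1..NT, j=k..NT (objective: simpler).

-- ===== PORT A =====
-- state tuple: (X1, X2, aux, aux2)
def list_generator (NT : Int) : List Int × List Int :=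
  -- for i in range(1, NT+1): X1.append(i); aux.append(i); X2.append(aux2)
  let s1 := (PySem.List.pyRange 1 (NT + 1) 1).foldl
    (fun (s : List Int × List Int × List Int × Int) i =>
      (s.1 ++ [i], s.2.1 ++ [s.2.2.2], s.2.2.1 ++ [i], s.2.2.2))
    ([], [], [], 1)
  -- for i in range(NT-1): aux.pop(0); aux2 += 1; for j in aux: X1.append(j); X2.append(aux2)
  let s2 := (PySem.List.pyRange 0 (NT - 1) 1).foldl
    (fun (s : List Int × List Int × List Int × Int) _ =>
      -- aux.pop(0) discards the head (aux is nonempty whenever this loop body runs);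
      -- as a list effect it is exactly `tail`
      let aux' := s.2.2.1.tail
      let c' := s.2.2.2 + 1
      let p := aux'.foldl
        (fun (t : List Int × List Int) j => (t.1 ++ [j], t.2 ++ [c'])) (s.1, s.2.1)
      (p.1, p.2, aux', c'))
    s1
  (s2.1, s2.2.1)

-- ===== PORT B =====
def list_generator_alt (NT : Int) : List Int × List Int :=
  (PySem.List.pyRange 1 (NT + 1) 1).foldl
    (fun (s : List Int × List Int) k =>
      (PySem.List.pyRange k (NT + 1) 1).foldl
        (fun (t : List Int × List Int) j => (t.1 ++ [j], t.2 ++ [k])) s)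
    ([], [])

-- ===== PRECONDITION & SPEC =====
def Spec_list_generator (NT : Int) (out : List Int × List Int) : Prop := out = list_generator_alt NT
instance (NT : Int) (out : List Int × List Int) : Decidable (Spec_list_generator NT out) := by unfold Spec_list_generator; infer_instance

-- ===== CLAIM (what is proved, stated in full; the proofs are below) =====
def Claim_equal_list_generator : Prop := ∀ (NT : Int), Dom_list_generator NT → Spec_list_generator NT (list_generator NT)

-- ===== LEMMAS AND PROOFS =====

-- the inner append loop shared by both ports
theorem pv_inner (k : Int) (L : List Int) :
    ∀ (s : List Int × List Int),
      L.foldl (fun (t : List Int × List Int) j => (t.1 ++ [j], t.2 ++ [k])) s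
        = (s.1 ++ L, s.2 ++ L.map (fun _ => k)) := by
  induction L with
  | nil => intro s; simp
  | cons x L ih => intro s; simp [List.foldl_cons, ih]

-- A's first loop
theorem pv_first (L : List Int) :
    ∀ (X1 X2 aux : List Int) (c : Int),
      L.foldl (fun (s : List Int × List Int × List Int × Int) i =>
          (s.1 ++ [i], s.2.1 ++ [s.2.2.2], s.2.2.1 ++ [i], s.2.2.2)) (X1, X2, aux, c)
        = (X1 ++ L, X2 ++ L.map (fun _ => c), aux ++ L, c) := by
  induction L with
  | nil => intro X1 X2 aux c; simp
  | cons x L ih => intro X1 X2 aux c; simp [List.foldl_cons, ih]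

theorem pv_tail_pyRange (a b : Int) :
    (PySem.List.pyRange a b 1).tail = PySem.List.pyRange (a + 1) b 1 := by
  by_cases h : a < b
  · rw [PySem.List.pyRange_one_cons h]; rfl
  · rw [PySem.List.pyRange_one_eq_nil (by omega), PySem.List.pyRange_one_eq_nil (by omega)]; rfl

-- A's second loop, as blocks indexed by k = c+1 .. c+|L|
theorem pv_second (b : Int) (L : List Int) :
    ∀ (X1 X2 : List Int) (c : Int),
      L.foldl (fun (s : List Int × List Int × List Int × Int) _ =>
          let aux' := s.2.2.1.tail
          let c' := s.2.2.2 + 1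
          let p := aux'.foldl
            (fun (t : List Int × List Int) j => (t.1 ++ [j], t.2 ++ [c'])) (s.1, s.2.1)
          (p.1, p.2, aux', c'))
        (X1, X2, PySem.List.pyRange c b 1, c)
        = (X1 ++ (PySem.List.pyRange (c + 1) (c + L.length + 1) 1).flatMap
              (fun k => PySem.List.pyRange k b 1),
           X2 ++ (PySem.List.pyRange (c + 1) (c + L.length + 1) 1).flatMap
              (fun k => (PySem.List.pyRange k b 1).map (fun _ => k)),
           PySem.List.pyRange (c + L.length) b 1, c + L.length) := by
  induction L with
  | nil =>
    intro X1 X2 c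
    simp only [List.length_nil, Nat.cast_zero, add_zero, List.foldl_nil]
    rw [PySem.List.pyRange_one_eq_nil (le_refl _)]
    simp
  | cons x L ih =>
    intro X1 X2 c
    rw [List.foldl_cons]
    simp only [pv_tail_pyRange]
    rw [pv_inner, ih]
    have hcons : PySem.List.pyRange (c + 1) (c + (x :: L).length + 1) 1
        = (c + 1) :: PySem.List.pyRange (c + 2) (c + (x :: L).length + 1) 1 := by
      rw [PySem.List.pyRange_one_cons (by push_cast [List.length_cons]; omega)]
      congr 2
      ring
    rw [hcons]
    have e1 : c + 1 + 1 = c + 2 := by ring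
    have e2 : c + 1 + (L.length : Int) + 1 = c + ((x :: L).length : Int) + 1 := by
      push_cast [List.length_cons]; ring
    have e3 : c + 1 + (L.length : Int) = c + ((x :: L).length : Int) := by
      push_cast [List.length_cons]; ring
    rw [e1, e2, e3]
    simp [List.append_assoc]

-- B as blocks
theorem pv_alt (b : Int) (K : List Int) :
    ∀ (s : List Int × List Int),
      K.foldl (fun (s : List Int × List Int) k =>
          (PySem.List.pyRange k b 1).foldl
            (fun (t : List Int × List Int) j => (t.1 ++ [j], t.2 ++ [k])) s) s
        = (s.1 ++ K.flatMap (fun k => PySem.List.pyRange k b 1),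
           s.2 ++ K.flatMap (fun k => (PySem.List.pyRange k b 1).map (fun _ => k))) := by
  induction K with
  | nil => intro s; simp
  | cons k K ih =>
    intro s
    rw [List.foldl_cons, pv_inner, ih]
    simp [List.append_assoc]

-- ===== VERDICT (by name: the statement is the Claim_ definition above) =====
theorem list_generator_spec : Claim_equal_list_generator := by
  intro NT _
  unfold Spec_list_generator list_generator list_generator_alt
  simp only [pv_alt, pv_first]
  by_cases h : 1 ≤ NT
  · rw [show ([] : List Int) ++ PySem.List.pyRange 1 (NT + 1) 1 = PySem.List.pyRange 1 (NT + 1) 1 from List.nil_append _]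
    rw [pv_second]
    have hlen : ((PySem.List.pyRange 0 (NT - 1) 1).length : Int) = NT - 1 := by
      rw [PySem.List.length_pyRange_one]; omega
    have hK : PySem.List.pyRange 1 (NT + 1) 1
        = 1 :: PySem.List.pyRange 2 (NT + 1) 1 := by
      rw [PySem.List.pyRange_one_cons (by omega)]; norm_num
    simp only [hlen]
    have h2 : 1 + (NT - 1) + 1 = NT + 1 := by ring
    rw [h2, hK]
    simp [List.flatMap_cons, hK]
    have hrep : NT.toNat = (NT + 1 - 2).toNat + 1 := by omega
    rw [hrep, List.replicate_succ]
    simp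
  · have h0 : PySem.List.pyRange 1 (NT + 1) 1 = [] :=
      PySem.List.pyRange_one_eq_nil (by omega)
    have h1 : PySem.List.pyRange 0 (NT - 1) 1 = [] :=
      PySem.List.pyRange_one_eq_nil (by omega)
    simp [h0, h1]
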